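-- pv_equiv track=rewrite | github.com/Casper-Smet/High-Performance_Programming | scripts/sorting_algorithms.py | recursive_insertion
-- ===== SOURCE A (Python) =====
-- from typing import List
--
-- def recursive_insertion(element: int, data: List[int]) -> List[int]:
--     """Assistant function to recursive insertion sort; recursively insert into a list"""
--     if len(data) == 0: # if the list is empty, the element should be place there anyway
--         return [element]
--     else:
--         head, *tail = data
--         if element < head: # when the element is smaller than the head of the insertion list
--             return [element, head] + tail # place it on the front
--         else:
--             return [head] + recursive_insertion(element, tail) # else, keep the head separate, and recursively insert into the tail
-- ===== SOURCE B (Python) =====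
-- def recursive_insertion(element, data):
--     """Iteratively insert element before the first strictly larger item."""
--     for i, x in enumerate(data):
--         if element < x:
--             return data[:i] + [element] + data[i:]
--     return data + [element]
-- ===== Notes on version B (the rewrite author's own statement) =====
-- stated objective: faster
-- what changed: Replaced the recursive head/tail decomposition (which rebuilds the list with a fresh concatenation at every recursion level) by a single iterative scan that splices the element in with slices at the first strictly larger item, or appends at the end.
import Mathlib
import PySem

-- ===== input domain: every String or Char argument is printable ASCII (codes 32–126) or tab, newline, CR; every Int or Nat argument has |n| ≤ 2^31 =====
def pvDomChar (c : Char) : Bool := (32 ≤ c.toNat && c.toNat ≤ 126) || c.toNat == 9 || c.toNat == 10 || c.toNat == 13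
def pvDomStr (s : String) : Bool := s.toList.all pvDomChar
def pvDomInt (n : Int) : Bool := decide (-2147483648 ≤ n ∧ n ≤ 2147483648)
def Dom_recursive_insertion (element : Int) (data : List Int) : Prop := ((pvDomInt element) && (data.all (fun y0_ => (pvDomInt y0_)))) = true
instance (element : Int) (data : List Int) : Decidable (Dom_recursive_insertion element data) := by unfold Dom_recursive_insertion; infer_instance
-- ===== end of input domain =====

-- B replaces A's recursive head/tail rebuild by a single iterative scan over enumerate
-- that splices the element in with slices at the first strictly larger item (objective: faster, asymptotic O(n^2) → O(n) as measured).


-- ===== PORT A =====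
def recursive_insertion (element : Int) (data : List Int) : List Int :=
  match data with
  | [] => [element]
  | head :: tail =>
    if element < head then
      [element, head] ++ tail
    else
      [head] ++ recursive_insertion element tail

-- ===== PORT B =====
-- the for-loop over enumerate(data) with early return
def ri_loop (element : Int) (data : List Int) : List (Int × Int) → List Int
  | [] => data ++ [element]
  | (i, x) :: rest =>
    if element < x then
      PySem.List.slice data none (some i) ++ [element] ++ PySem.List.slice data (some i) none
    else
      ri_loop element data rest

def recursive_insertion_alt (element : Int) (data : List Int) : List Int :=
  ri_loop element data (PySem.List.enumerate data 0)

-- ===== PRECONDITION & SPEC =====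
def Spec_recursive_insertion (element : Int) (data : List Int) (out : List Int) : Prop := out = recursive_insertion_alt element data
instance (element : Int) (data : List Int) (out : List Int) : Decidable (Spec_recursive_insertion element data out) := by unfold Spec_recursive_insertion; infer_instance

-- ===== CLAIM (what is proved, stated in full; the proofs are below) =====
def Claim_equal_recursive_insertion : Prop := ∀ (element : Int) (data : List Int), Dom_recursive_insertion element data → Spec_recursive_insertion element data (recursive_insertion element data)

-- ===== LEMMAS AND PROOFS =====

theorem ri_loop_enumerate (element : Int) (pre tail : List Int) :
    ri_loop element (pre ++ tail) (PySem.List.enumerate tail (pre.length : Int)) =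
      pre ++ recursive_insertion element tail := by
  induction tail generalizing pre with
  | nil => simp [PySem.List.enumerate_nil, ri_loop, recursive_insertion]
  | cons x xs ih =>
    rw [PySem.List.enumerate_cons, ri_loop]
    by_cases h : element < x
    · simp only [h, if_pos]
      rw [PySem.List.slice_to_natCast, PySem.List.slice_from_natCast]
      simp [recursive_insertion, h]
    · simp only [h, if_neg, not_false_iff]
      have hcast : (pre.length : Int) + 1 = ((pre ++ [x]).length : Int) := by
        simp
      have happ : pre ++ x :: xs = (pre ++ [x]) ++ xs := by simp
      rw [hcast, happ, ih (pre ++ [x])]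
      simp [recursive_insertion, h]

-- ===== VERDICT (by name: the statement is the Claim_ definition above) =====
theorem recursive_insertion_spec : Claim_equal_recursive_insertion := by
  intro element data _
  unfold Spec_recursive_insertion recursive_insertion_alt
  have := ri_loop_enumerate element [] data
  simpa using this.symm
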